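-- pv_equiv track=rewrite | github.com/chaidiscovery/chai-lab | chai_lab/data/dataset/structure/all_atom_residue_tokenizer.py | _make_sym_ids
-- ===== SOURCE A (Python) =====
-- def _make_sym_ids(entity_ids_per_chain: list[int]) -> list[int]:
--     entities_dict: dict[int, int] = dict()
--     sym_ids = []
--
--     for entity_id in entity_ids_per_chain:
--         sym_id = entities_dict.get(entity_id, 0)
--         sym_ids.append(sym_id)
--         entities_dict[entity_id] = sym_id + 1
--
--     return sym_ids
-- ===== SOURCE B (Python) =====
-- def _make_sym_ids(entity_ids_per_chain: list[int]) -> list[int]: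
--     return [entity_ids_per_chain[:i].count(e)
--             for i, e in enumerate(entity_ids_per_chain)]
-- ===== Notes on version B (the rewrite author's own statement) =====
-- stated objective: simpler
-- what changed: Replaces the maintained entity->counter dict and appended list with a one-line comprehension that computes each symmetry id as the count of strictly-prior occurrences of its entity id in the prefix slice.
import Mathlib
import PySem

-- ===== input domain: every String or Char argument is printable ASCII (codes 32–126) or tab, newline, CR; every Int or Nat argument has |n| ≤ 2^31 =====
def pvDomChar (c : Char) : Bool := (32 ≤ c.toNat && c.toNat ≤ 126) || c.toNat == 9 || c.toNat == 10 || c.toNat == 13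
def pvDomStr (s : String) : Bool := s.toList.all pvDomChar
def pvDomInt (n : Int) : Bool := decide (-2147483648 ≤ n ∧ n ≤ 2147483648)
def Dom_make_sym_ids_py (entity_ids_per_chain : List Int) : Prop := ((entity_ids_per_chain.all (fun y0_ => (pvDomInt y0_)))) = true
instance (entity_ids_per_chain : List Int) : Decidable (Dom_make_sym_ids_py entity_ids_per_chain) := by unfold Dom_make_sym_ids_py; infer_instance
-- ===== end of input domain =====

-- B is a one-line prefix-count comprehension instead of A's maintained counter dict; equivalence of return values is proved.

-- ===== PORT A =====
-- A: maintain a dict entity_id -> next sym id, appending the current value per chain.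
def make_sym_ids_py (entity_ids_per_chain : List Int) : List Int :=
  (entity_ids_per_chain.foldl
    (fun (st : PySem.Dict Int Int × List Int) entity_id =>
      let sym_id := st.1.getD entity_id 0
      (st.1.insert entity_id (sym_id + 1), st.2 ++ [sym_id]))
    (PySem.Dict.empty, [])).2

-- ===== PORT B =====
-- B: [entity_ids_per_chain[:i].count(e) for i, e in enumerate(entity_ids_per_chain)]
def make_sym_ids_py_alt (entity_ids_per_chain : List Int) : List Int :=
  (PySem.List.enumerate entity_ids_per_chain 0).map
    (fun p => ((PySem.List.slice entity_ids_per_chain none (some p.1)).count p.2 : Int))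

-- ===== PRECONDITION & SPEC =====
def Spec_make_sym_ids_py (entity_ids_per_chain : List Int) (out : List Int) : Prop := out = make_sym_ids_py_alt entity_ids_per_chain
instance (entity_ids_per_chain : List Int) (out : List Int) : Decidable (Spec_make_sym_ids_py entity_ids_per_chain out) := by unfold Spec_make_sym_ids_py; infer_instance

-- ===== CLAIM (what is proved, stated in full; the proofs are below) =====
def Claim_equal_make_sym_ids_py : Prop := ∀ (entity_ids_per_chain : List Int), Dom_make_sym_ids_py entity_ids_per_chain → Spec_make_sym_ids_py entity_ids_per_chain (make_sym_ids_py entity_ids_per_chain)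

-- ===== LEMMAS AND PROOFS =====

-- The dict component of A's fold is exactly the counter of the processed prefix,
-- independently of the list accumulator.
theorem pv_fold_fst (l : List Int) (d : PySem.Dict Int Int) (acc : List Int) :
    (l.foldl
      (fun (st : PySem.Dict Int Int × List Int) e =>
        (st.1.insert e (st.1.getD e 0 + 1), st.2 ++ [st.1.getD e 0]))
      (d, acc)).1
    = l.foldl (fun d e => d.insert e (d.getD e 0 + 1)) d := by
  induction l generalizing d acc with
  | nil => rfl
  | cons x xs ih => simp [List.foldl, ih]

theorem pv_A_append (l : List Int) (x : Int) :
    make_sym_ids_py (l ++ [x]) = make_sym_ids_py l ++ [(l.count x : Int)] := by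
  have hfst : (l.foldl
      (fun (st : PySem.Dict Int Int × List Int) e =>
        (st.1.insert e (st.1.getD e 0 + 1), st.2 ++ [st.1.getD e 0]))
      (PySem.Dict.empty, [])).1.getD x 0 = (l.count x : Int) := by
    rw [pv_fold_fst, PySem.Dict.foldl_insert_getD_add_one_eq_counter,
      PySem.Dict.getD_counter]
  simp only [make_sym_ids_py, List.foldl_append, List.foldl_cons, List.foldl_nil]
  simp [hfst]

theorem pv_B_append (l : List Int) (x : Int) :
    make_sym_ids_py_alt (l ++ [x]) = make_sym_ids_py_alt l ++ [(l.count x : Int)] := by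
  unfold make_sym_ids_py_alt
  rw [PySem.List.enumerate_append]
  simp only [List.map_append]
  congr 1
  · apply List.map_congr_left
    intro p hp
    obtain ⟨k, hk, rfl⟩ := (PySem.List.mem_enumerate_iff _ _ _).1 hp
    simp only [zero_add]
    rw [show ((k : Int)) = ((k : Nat) : Int) by simp, PySem.List.slice_to_natCast,
      PySem.List.slice_to_natCast, List.take_append_of_le_length (le_of_lt hk)]
  · simp only [PySem.List.enumerate, List.map_cons, List.map_nil]
    rw [show ((0 : Int) + l.length) = ((l.length : Nat) : Int) by simp,
      PySem.List.slice_to_natCast]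
    simp

theorem make_sym_ids_py_eq (l : List Int) :
    make_sym_ids_py l = make_sym_ids_py_alt l := by
  induction l using List.reverseRecOn with
  | nil => rfl
  | append_singleton xs x ih => rw [pv_A_append, pv_B_append, ih]

-- ===== VERDICT (by name: the statement is the Claim_ definition above) =====
theorem make_sym_ids_py_spec : Claim_equal_make_sym_ids_py := by
  intro l _
  exact make_sym_ids_py_eq l
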